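-- pv_equiv track=rewrite | github.com/abderrahmanriag/mem_code | solve_ben/solve_OR5x100/0.25_1/verify.py | BestAndWorst
-- ===== SOURCE A (Python) =====
-- def BestAndWorst(solutions):
--                     sol=[]
--                     for i in range(len(solutions)):
--                                         sol.append(solutions[i][1])
--                     b=sol.index(max(sol))
--                     b=solutions[b]
--                     w=sol.index(min(sol))
--                     w=solutions[w]
--                     return b, w
-- ===== SOURCE B (Python) =====
-- def BestAndWorst(solutions):
--     best = worst = solutions[0]
--     bv = wv = best[1]
--     for s in solutions[1:]:
--         v = s[1]
--         if v > bv: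
--             best, bv = s, v
--         if v < wv:
--             worst, wv = s, v
--     return best, worst
-- ===== Notes on version B (the rewrite author's own statement) =====
-- stated objective: alternative
-- what changed: Replaces the build-a-values-list + max()/min() + two list.index() scans with a single pass that maintains the best and worst rows directly (strict comparisons keep the first-occurrence tie-break); same O(n) cost since A's extra passes are C builtins.
import Mathlib
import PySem

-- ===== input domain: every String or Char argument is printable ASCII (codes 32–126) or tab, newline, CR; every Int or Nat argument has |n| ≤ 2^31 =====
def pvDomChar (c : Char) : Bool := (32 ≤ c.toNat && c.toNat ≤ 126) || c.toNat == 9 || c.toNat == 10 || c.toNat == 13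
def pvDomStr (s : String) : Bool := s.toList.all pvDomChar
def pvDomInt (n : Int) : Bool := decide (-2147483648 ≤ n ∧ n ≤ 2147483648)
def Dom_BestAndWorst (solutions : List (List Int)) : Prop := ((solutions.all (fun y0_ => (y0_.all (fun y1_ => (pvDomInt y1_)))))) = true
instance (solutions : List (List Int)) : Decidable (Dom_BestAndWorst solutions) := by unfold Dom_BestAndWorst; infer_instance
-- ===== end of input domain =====

-- B replaces A's values-list + max()/min() + two .index() scans by a single pass that keeps the best and worst rows directly.


-- ===== PORT A =====
def BestAndWorst (solutions : List (List Int)) : List Int × List Int :=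
  let sol := (PySem.List.pyRange 0 (solutions.length : Int) 1).foldl
      (fun acc i => acc ++ [PySem.List.pyGetD (PySem.List.pyGetD solutions i []) 1 0]) []
  let b := ((PySem.List.max? sol (fun x => x)).bind
      (fun m => (PySem.List.index? sol m).map (Int.ofNat))).getD 0
  let bs := PySem.List.pyGetD solutions b []
  let w := ((PySem.List.min? sol (fun x => x)).bind
      (fun m => (PySem.List.index? sol m).map (Int.ofNat))).getD 0
  let ws := PySem.List.pyGetD solutions w []
  (bs, ws)

-- ===== PORT B =====
def BestAndWorst_alt (solutions : List (List Int)) : List Int × List Int :=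
  match solutions with
  | [] => ([], [])
  | first :: rest =>
    let bv0 := PySem.List.pyGetD first 1 0
    let st := rest.foldl
      (fun (st : (List Int × Int) × (List Int × Int)) s =>
        let v := PySem.List.pyGetD s 1 0
        let b := if v > st.1.2 then (s, v) else st.1
        let w := if v < st.2.2 then (s, v) else st.2
        (b, w))
      ((first, bv0), (first, bv0))
    (st.1.1, st.2.1)

-- ===== PRECONDITION & SPEC =====
-- A raises ValueError on an empty list (max([])) and IndexError when some row has fewer than 2 entries: those inputs are excluded.
def Pre_BestAndWorst (solutions : List (List Int)) : Prop :=
  solutions ≠ [] ∧ ∀ r ∈ solutions, 2 ≤ r.length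
instance (solutions : List (List Int)) : Decidable (Pre_BestAndWorst solutions) := by
  unfold Pre_BestAndWorst; infer_instance
def pvWitness_BestAndWorst : List (List Int) := [[1, 5], [2, 3], [0, 7]]

def Spec_BestAndWorst (solutions : List (List Int)) (out : List Int × List Int) : Prop :=
  out = BestAndWorst_alt solutions
instance (solutions : List (List Int)) (out : List Int × List Int) : Decidable (Spec_BestAndWorst solutions out) := by
  unfold Spec_BestAndWorst; infer_instance

-- ===== CLAIM (what is proved, stated in full; the proofs are below) =====
def Claim_equal_BestAndWorst : Prop := ∀ (solutions : List (List Int)), Dom_BestAndWorst solutions → Pre_BestAndWorst solutions → Spec_BestAndWorst solutions (BestAndWorst solutions)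

-- ===== LEMMAS AND PROOFS =====

-- proof-only abbreviations for B's loop: second field of a row, and the best/worst update steps
def pvG (r : List Int) : Int := PySem.List.pyGetD r 1 0
def pvBStep (p : List Int × Int) (s : List Int) : List Int × Int :=
  if pvG s > p.2 then (s, pvG s) else p
def pvWStep (p : List Int × Int) (s : List Int) : List Int × Int :=
  if pvG s < p.2 then (s, pvG s) else p

lemma pvFoldPair (l : List (List Int)) (i1 i2 : List Int × Int) :
    l.foldl (fun st s => (pvBStep st.1 s, pvWStep st.2 s)) (i1, i2)
      = (l.foldl pvBStep i1, l.foldl pvWStep i2) := by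
  induction l generalizing i1 i2 with
  | nil => rfl
  | cons s t ih => simp [List.foldl_cons, ih]

-- B's best loop computes the running max of second fields and ends at the FIRST row attaining it.
lemma pvBestLoop (l : List (List Int)) : ∀ a : List Int,
    (l.foldl pvBStep (a, pvG a)).2 = (l.map pvG).foldl max (pvG a) ∧
    pvG a ≤ (l.foldl pvBStep (a, pvG a)).2 ∧
    ∃ j : Nat, PySem.List.index? ((a :: l).map pvG) (l.foldl pvBStep (a, pvG a)).2 = some j ∧
      (a :: l).getD j [] = (l.foldl pvBStep (a, pvG a)).1 := by
  induction l with
  | nil =>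
    intro a
    exact ⟨rfl, le_refl _, 0, PySem.List.index?_cons_self _ _, rfl⟩
  | cons s t ih =>
    intro a
    by_cases h : pvG s > pvG a
    · have step : (s :: t).foldl pvBStep (a, pvG a) = t.foldl pvBStep (s, pvG s) := by
        simp [List.foldl_cons, pvBStep, h]
      obtain ⟨h1, h2, j, hidx, hget⟩ := ih s
      rw [step]
      have hle : pvG a ≤ (t.foldl pvBStep (s, pvG s)).2 := le_trans (le_of_lt h) h2
      refine ⟨?_, hle, j + 1, ?_, ?_⟩
      · rw [h1, List.map_cons, List.foldl_cons, max_eq_right (le_of_lt h)]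
      · have hne : pvG a ≠ (t.foldl pvBStep (s, pvG s)).2 :=
          ne_of_lt (lt_of_lt_of_le h h2)
        rw [List.map_cons, PySem.List.index?_cons_of_ne _ hne, hidx]
        rfl
      · simpa using hget
    · have step : (s :: t).foldl pvBStep (a, pvG a) = t.foldl pvBStep (a, pvG a) := by
        simp [List.foldl_cons, pvBStep, h]
      obtain ⟨h1, h2, j, hidx, hget⟩ := ih a
      rw [step]
      rw [not_lt] at h
      refine ⟨?_, h2, ?_⟩
      · rw [h1, List.map_cons, List.foldl_cons, max_eq_left h]
      · by_cases he : pvG a = (t.foldl pvBStep (a, pvG a)).2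
        · have hj : j = 0 := by
            rw [List.map_cons, ← he, PySem.List.index?_cons_self] at hidx
            exact (Option.some_injective _ hidx).symm
          subst hj
          refine ⟨0, ?_, ?_⟩
          · rw [List.map_cons, ← he, PySem.List.index?_cons_self]
          · simpa using hget
        · have ha : pvG a < (t.foldl pvBStep (a, pvG a)).2 := lt_of_le_of_ne h2 he
          have hs : pvG s ≠ (t.foldl pvBStep (a, pvG a)).2 :=
            ne_of_lt (lt_of_le_of_lt h ha)
          rw [List.map_cons, PySem.List.index?_cons_of_ne _ he] at hidx
          obtain ⟨j0, hj0, hj⟩ := Option.map_eq_some_iff.mp hidx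
          refine ⟨j0 + 2, ?_, ?_⟩
          · rw [List.map_cons, List.map_cons, PySem.List.index?_cons_of_ne _ he,
              PySem.List.index?_cons_of_ne _ hs, hj0]
            rfl
          · have h3 : (a :: t).getD (j0 + 1) [] = t.getD j0 [] := by simp
            rw [← hj, h3] at hget
            simpa using hget
-- B's worst loop computes the running min of second fields and ends at the FIRST row attaining it.
lemma pvWorstLoop (l : List (List Int)) : ∀ a : List Int,
    (l.foldl pvWStep (a, pvG a)).2 = (l.map pvG).foldl min (pvG a) ∧
    (l.foldl pvWStep (a, pvG a)).2 ≤ pvG a ∧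
    ∃ j : Nat, PySem.List.index? ((a :: l).map pvG) (l.foldl pvWStep (a, pvG a)).2 = some j ∧
      (a :: l).getD j [] = (l.foldl pvWStep (a, pvG a)).1 := by
  induction l with
  | nil =>
    intro a
    exact ⟨rfl, le_refl _, 0, PySem.List.index?_cons_self _ _, rfl⟩
  | cons s t ih =>
    intro a
    by_cases h : pvG s < pvG a
    · have step : (s :: t).foldl pvWStep (a, pvG a) = t.foldl pvWStep (s, pvG s) := by
        simp [List.foldl_cons, pvWStep, h]
      obtain ⟨h1, h2, j, hidx, hget⟩ := ih s
      rw [step]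
      have hle : (t.foldl pvWStep (s, pvG s)).2 ≤ pvG a := le_trans h2 (le_of_lt h)
      refine ⟨?_, hle, j + 1, ?_, ?_⟩
      · rw [h1, List.map_cons, List.foldl_cons, min_eq_right (le_of_lt h)]
      · have hne : pvG a ≠ (t.foldl pvWStep (s, pvG s)).2 :=
          Ne.symm (ne_of_lt (lt_of_le_of_lt h2 h))
        rw [List.map_cons, PySem.List.index?_cons_of_ne _ hne, hidx]
        rfl
      · simpa using hget
    · have step : (s :: t).foldl pvWStep (a, pvG a) = t.foldl pvWStep (a, pvG a) := by
        simp [List.foldl_cons, pvWStep, h]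
      obtain ⟨h1, h2, j, hidx, hget⟩ := ih a
      rw [step]
      rw [not_lt] at h
      refine ⟨?_, h2, ?_⟩
      · rw [h1, List.map_cons, List.foldl_cons, min_eq_left h]
      · by_cases he : pvG a = (t.foldl pvWStep (a, pvG a)).2
        · have hj : j = 0 := by
            rw [List.map_cons, ← he, PySem.List.index?_cons_self] at hidx
            exact (Option.some_injective _ hidx).symm
          subst hj
          refine ⟨0, ?_, ?_⟩
          · rw [List.map_cons, ← he, PySem.List.index?_cons_self]
          · simpa using hget
        · have ha : (t.foldl pvWStep (a, pvG a)).2 < pvG a :=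
            lt_of_le_of_ne h2 (fun e => he e.symm)
          have hs : pvG s ≠ (t.foldl pvWStep (a, pvG a)).2 :=
            Ne.symm (ne_of_lt (lt_of_lt_of_le ha h))
          rw [List.map_cons, PySem.List.index?_cons_of_ne _ he] at hidx
          obtain ⟨j0, hj0, hj⟩ := Option.map_eq_some_iff.mp hidx
          refine ⟨j0 + 2, ?_, ?_⟩
          · rw [List.map_cons, List.map_cons, PySem.List.index?_cons_of_ne _ he,
              PySem.List.index?_cons_of_ne _ hs, hj0]
            rfl
          · have h3 : (a :: t).getD (j0 + 1) [] = t.getD j0 [] := by simp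
            rw [← hj, h3] at hget
            simpa using hget

lemma pvMain (f : List Int) (rest : List (List Int)) :
    BestAndWorst (f :: rest) = BestAndWorst_alt (f :: rest) := by
  -- B's side: split the paired fold
  have hB : BestAndWorst_alt (f :: rest)
      = ((rest.foldl pvBStep (f, pvG f)).1, (rest.foldl pvWStep (f, pvG f)).1) := by
    show ((rest.foldl (fun st s => (pvBStep st.1 s, pvWStep st.2 s)) ((f, pvG f), (f, pvG f))).1.1,
          (rest.foldl (fun st s => (pvBStep st.1 s, pvWStep st.2 s)) ((f, pvG f), (f, pvG f))).2.1)
        = _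
    rw [pvFoldPair]
  -- A's side: the values list is the map of second fields
  have hsol : ((PySem.List.pyRange 0 (((f :: rest).length : Int)) 1).foldl
      (fun acc i => acc ++ [PySem.List.pyGetD (PySem.List.pyGetD (f :: rest) i []) 1 0]) [])
      = (f :: rest).map pvG := by
    have h := PySem.List.foldl_pyRange_zero_pyGetD' (f :: rest) ([] : List Int)
      (fun acc r => acc ++ [PySem.List.pyGetD r 1 0]) []
    simp only [] at h
    rw [h, PySem.List.foldl_append_singleton_eq_map]
    simp [pvG]
  obtain ⟨b1, _, jb, hjb, hgb⟩ := pvBestLoop rest f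
  obtain ⟨w1, _, jw, hjw, hgw⟩ := pvWorstLoop rest f
  rw [hB]
  show (PySem.List.pyGetD (f :: rest) _ [], PySem.List.pyGetD (f :: rest) _ []) = _
  rw [hsol, List.map_cons, PySem.List.max?_id_cons, PySem.List.min?_id_cons,
    ← List.map_cons, ← b1, ← w1]
  show (PySem.List.pyGetD (f :: rest) ((Option.map Int.ofNat (PySem.List.index? (List.map pvG (f :: rest)) (List.foldl pvBStep (f, pvG f) rest).2)).getD 0) [], PySem.List.pyGetD (f :: rest) ((Option.map Int.ofNat (PySem.List.index? (List.map pvG (f :: rest)) (List.foldl pvWStep (f, pvG f) rest).2)).getD 0) []) = _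
  rw [hjb, hjw]
  simp only [Option.map_some, Option.getD_some, Int.ofNat_eq_natCast, PySem.List.pyGetD_natCast]
  rw [hgb, hgw]

-- ===== VERDICT (by name: the statement is the Claim_ definition above) =====
theorem BestAndWorst_spec : Claim_equal_BestAndWorst := by
  intro solutions _ hpre
  obtain ⟨hne, -⟩ := hpre
  match solutions, hne with
  | f :: rest, _ => exact pvMain f rest
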